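-- pv_equiv track=rewrite | github.com/justzino/algorithms | This-is-Coding-Test-Book/Greedy/11-6.py | solution
-- ===== SOURCE A (Python) =====
-- from collections import deque
--
-- def solution(food_times, k):
--     n = len(food_times)
--     q = deque()
--
--     for i in range(n):
--         q.append((i, food_times[i]))
--
--     while q:
--         food, time = q.popleft()
--
--         if k == 0:
--             return food + 1
--
--         k -= 1
--         time -= 1
--
--         if time == 0:
--             continue
--         q.append([food, time])
--
--     return -1
-- ===== SOURCE B (Python) =====
-- def solution(food_times, k):
--     # Round-based simulation: handle one full pass over the remaining foods at a
--     # time instead of one bite at a time.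
--     foods = list(enumerate(food_times))
--     while foods:
--         if k < len(foods):
--             return foods[k][0] + 1
--         k -= len(foods)
--         foods = [(i, t - 1) for i, t in foods if t != 1]
--     return -1
-- ===== Notes on version B (the rewrite author's own statement) =====
-- stated objective: simpler
-- what changed: Replaces the one-bite-per-iteration deque rotation by a round-based simulation (answer directly when k falls inside the current pass, otherwise subtract a whole pass and rebuild the unfinished list in one comprehension); Pre_ excludes negative k, on which A either drains the queue to -1 or loops forever while B's positional indexing reads from the end.
-- outside the precondition, e.g. on solution([1], -1): A returns -1, B returns 1; on solution([2, 3], -5): A returns -1, B raises IndexError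
import Mathlib
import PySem

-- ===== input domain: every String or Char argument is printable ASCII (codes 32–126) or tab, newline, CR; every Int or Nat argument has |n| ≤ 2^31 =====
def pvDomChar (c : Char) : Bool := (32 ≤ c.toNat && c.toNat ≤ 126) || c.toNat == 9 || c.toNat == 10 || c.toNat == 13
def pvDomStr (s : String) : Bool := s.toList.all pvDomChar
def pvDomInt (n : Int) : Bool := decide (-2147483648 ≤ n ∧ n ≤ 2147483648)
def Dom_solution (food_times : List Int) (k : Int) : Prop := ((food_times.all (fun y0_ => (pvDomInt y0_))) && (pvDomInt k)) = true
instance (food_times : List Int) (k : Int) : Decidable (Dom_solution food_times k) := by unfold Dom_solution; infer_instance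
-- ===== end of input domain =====

-- B simulates whole passes over the remaining foods instead of A's one-bite-per-iteration
-- deque rotation.

-- ===== PORT A =====
-- A's while-loop: pop (food, time); return food+1 when the counter hits 0; decrement,
-- drop the item when its time reaches 0, else re-append.  The loop runs at most
-- k+1 iterations before returning (k decreases by one per iteration), so the fuel
-- k.toNat + 1 is merely a totality guard, exact for every k ≥ 0 (= Pre_solution).
def solutionLoop (fuel : Nat) (q : List (Int × Int)) (k : Int) : Int :=
  match fuel with
  | 0 => -1
  | fuel + 1 =>
    match q with
    | [] => -1
    | (food, time) :: rest =>
      if k = 0 then food + 1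
      else
        if time - 1 = 0 then solutionLoop fuel rest (k - 1)
        else solutionLoop fuel (rest ++ [(food, time - 1)]) (k - 1)

def solution (food_times : List Int) (k : Int) : Int :=
  solutionLoop (k.toNat + 1) (PySem.List.enumerate food_times) k

-- ===== PORT B =====
-- one pass: every unfinished food is eaten once; foods whose time was 1 are finished
def bRound (foods : List (Int × Int)) : List (Int × Int) :=
  foods.filterMap (fun p => if p.2 ≠ 1 then some (p.1, p.2 - 1) else none)

-- B's while-loop; foods[k] is PySem.List.pyGet? (in range whenever 0 ≤ k < len, i.e.
-- always under Pre_solution, so the getD default is never read there)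
def bLoop (foods : List (Int × Int)) (k : Int) : Int :=
  if _h : foods = [] then -1
  else if k < (foods.length : Int) then ((PySem.List.pyGet? foods k).getD (0, 0)).1 + 1
  else bLoop (bRound foods) (k - foods.length)
termination_by k.toNat
decreasing_by
  have : 1 ≤ foods.length := List.length_pos_iff.mpr _h
  omega

def solution_alt (food_times : List Int) (k : Int) : Int :=
  bLoop (PySem.List.enumerate food_times) k

-- ===== PRECONDITION & SPEC =====
-- Pre_ excludes negative k, on which A drains the queue to -1 (or, with a nonpositive
-- time in the list, never terminates) while B's foods[k] indexes from the end.
def Pre_solution (_food_times : List Int) (k : Int) : Prop := 0 ≤ k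
instance (food_times : List Int) (k : Int) : Decidable (Pre_solution food_times k) := by unfold Pre_solution; infer_instance
def pvWitness_solution : List Int × Int := ([3, 1, 2], 5)

def Spec_solution (food_times : List Int) (k : Int) (out : Int) : Prop := out = solution_alt food_times k
instance (food_times : List Int) (k : Int) (out : Int) : Decidable (Spec_solution food_times k out) := by unfold Spec_solution; infer_instance

-- ===== CLAIM (what is proved, stated in full; the proofs are below) =====
def Claim_equal_solution : Prop := ∀ (food_times : List Int) (k : Int), Dom_solution food_times k → Pre_solution food_times k → Spec_solution food_times k (solution food_times k)

-- ===== LEMMAS AND PROOFS =====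

-- the common specification: round-robin by whole rounds
def roundStep (q : List (Int × Int)) : List (Int × Int) :=
  q.filterMap (fun p => if p.2 - 1 = 0 then none else some (p.1, p.2 - 1))

def S (q : List (Int × Int)) (k : Int) : Int :=
  if _h : q = [] then -1
  else if _h2 : k < (q.length : Int) then (q.getD k.toNat (0, 0)).1 + 1
  else S (roundStep q) (k - q.length)
termination_by k.toNat
decreasing_by
  have hq : 1 ≤ (q.length : Int) := by
    have := List.length_pos_iff.mpr _h; omega
  omega

theorem S_nil (k : Int) : S [] k = -1 := by unfold S; simp

theorem S_lt (q : List (Int × Int)) (k : Int) (hq : q ≠ []) (h : k < (q.length : Int)) :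
    S q k = (q.getD k.toNat (0, 0)).1 + 1 := by
  unfold S; simp [hq, h]

theorem S_ge (q : List (Int × Int)) (k : Int) (hq : q ≠ []) (h : (q.length : Int) ≤ k) :
    S q k = S (roundStep q) (k - q.length) := by
  conv_lhs => unfold S
  simp [hq, show ¬ k < (q.length : Int) from not_lt.mpr h]

-- ---------- A = S ----------

theorem solutionLoop_lt : ∀ (fuel : Nat) (q : List (Int × Int)) (k : Int),
    0 ≤ k → k < (q.length : Int) → k.toNat + 1 ≤ fuel →
    solutionLoop fuel q k = (q.getD k.toNat (0, 0)).1 + 1 := by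
  intro fuel
  induction fuel with
  | zero => intro q k _ _ hf; omega
  | succ fuel ih =>
    intro q k hk hlt _hf
    match q with
    | [] => simp at hlt; omega
    | (f, t) :: rest =>
      by_cases h0 : k = 0
      · subst h0; simp [solutionLoop]
      · have hk1 : 0 ≤ k - 1 := by omega
        have hkn : k.toNat = (k - 1).toNat + 1 := by omega
        have hlt1 : k - 1 < (rest.length : Int) := by
          simp at hlt; omega
        have hf1 : (k - 1).toNat + 1 ≤ fuel := by omega
        simp only [solutionLoop, if_neg h0]
        by_cases ht : t - 1 = 0
        · rw [if_pos ht, ih rest (k - 1) hk1 hlt1 hf1, hkn]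
          simp [List.getD]
        · rw [if_neg ht, ih (rest ++ [(f, t - 1)]) (k - 1) hk1 (by simp; omega) hf1, hkn]
          simp only [List.getD, List.getElem?_cons_succ]
          rw [List.getElem?_append_left (by omega)]

theorem solutionLoop_round : ∀ (rest acc : List (Int × Int)) (fuel : Nat) (k : Int),
    (rest.length : Int) ≤ k →
    solutionLoop (fuel + rest.length) (rest ++ acc) k
      = solutionLoop fuel (acc ++ roundStep rest) (k - rest.length) := by
  intro rest
  induction rest with
  | nil => intro acc fuel k _; simp [roundStep]
  | cons p rs ih =>
    intro acc fuel k hk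
    obtain ⟨f, t⟩ := p
    have hlen : ((f, t) :: rs).length = rs.length + 1 := by simp
    have hk0 : ¬ k = 0 := by simp at hk; omega
    have hstep : fuel + ((f, t) :: rs).length = (fuel + rs.length) + 1 := by simp; omega
    rw [hstep]
    simp only [List.cons_append, solutionLoop, if_neg hk0]
    by_cases ht : t - 1 = 0
    · rw [if_pos ht, ih acc (fuel) (k - 1) (by simp at hk ⊢; omega)]
      have : roundStep ((f, t) :: rs) = roundStep rs := by simp [roundStep, ht]
      rw [this]
      congr 1
      simp; omega
    · rw [if_neg ht]
      have hq : (rs ++ acc) ++ [(f, t - 1)] = rs ++ (acc ++ [(f, t - 1)]) := by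
        simp
      rw [hq, ih (acc ++ [(f, t - 1)]) fuel (k - 1) (by simp at hk ⊢; omega)]
      have : roundStep ((f, t) :: rs) = (f, t - 1) :: roundStep rs := by
        simp [roundStep, ht]
      rw [this]
      have : (acc ++ [(f, t - 1)]) ++ roundStep rs = acc ++ ((f, t - 1) :: roundStep rs) := by
        simp
      rw [this]
      congr 1
      simp; omega

theorem solutionLoop_eq_S_aux : ∀ (n : Nat) (k : Int) (q : List (Int × Int)) (fuel : Nat),
    k.toNat = n → 0 ≤ k → k.toNat + 1 ≤ fuel → solutionLoop fuel q k = S q k := by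
  intro n
  induction n using Nat.strong_induction_on with
  | _ n ih =>
    intro k q fuel hn hk hf
    by_cases hq : q = []
    · subst hq
      obtain ⟨fuel', rfl⟩ : ∃ f', fuel = f' + 1 := ⟨fuel - 1, by omega⟩
      simp [solutionLoop, S_nil]
    · by_cases hlt : k < (q.length : Int)
      · rw [solutionLoop_lt fuel q k hk hlt hf, S_lt q k hq hlt]
      · have hlen1 : 1 ≤ q.length := List.length_pos_iff.mpr hq
        have hge : (q.length : Int) ≤ k := not_lt.mp hlt
        have hfuel : fuel = (fuel - q.length) + q.length := by omega
        have h1 := solutionLoop_round q [] (fuel - q.length) k hge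
        rw [List.append_nil, List.nil_append] at h1
        rw [hfuel, h1, S_ge q k hq hge]
        exact ih (k - q.length).toNat (by omega) _ _ _ rfl (by omega) (by omega)

theorem solutionLoop_eq_S (k : Int) (q : List (Int × Int)) (hk : 0 ≤ k) :
    ∀ fuel, k.toNat + 1 ≤ fuel → solutionLoop fuel q k = S q k := by
  intro fuel hf
  exact solutionLoop_eq_S_aux k.toNat k q fuel rfl hk hf

-- ---------- B = S ----------

theorem bRound_eq_roundStep (q : List (Int × Int)) : bRound q = roundStep q := by
  unfold bRound roundStep
  apply List.filterMap_congr
  intro p _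
  by_cases h : p.2 = 1
  · rw [if_neg (by omega : ¬ p.2 ≠ 1), if_pos (by omega : p.2 - 1 = 0)]
  · rw [if_pos h, if_neg (by omega : ¬ p.2 - 1 = 0)]

theorem bLoop_eq_S : ∀ (n : Nat) (k : Int) (q : List (Int × Int)),
    k.toNat = n → 0 ≤ k → bLoop q k = S q k := by
  intro n
  induction n using Nat.strong_induction_on with
  | _ n ih =>
    intro k q hn hk
    by_cases hq : q = []
    · subst hq
      rw [S_nil]
      unfold bLoop
      simp
    · by_cases hlt : k < (q.length : Int)
      · rw [S_lt q k hq hlt]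
        unfold bLoop
        rw [dif_neg hq, if_pos hlt]
        have hidx : k.toNat < q.length := by omega
        rw [PySem.List.pyGet?_of_nonneg (h := hk), List.getElem?_eq_getElem hidx]
        simp [List.getD, List.getElem?_eq_getElem hidx]
      · have hlen1 : 1 ≤ q.length := List.length_pos_iff.mpr hq
        have hge : (q.length : Int) ≤ k := not_lt.mp hlt
        rw [S_ge q k hq hge]
        conv_lhs => unfold bLoop
        rw [dif_neg hq, if_neg hlt, bRound_eq_roundStep]
        exact ih (k - q.length).toNat (by omega) _ _ rfl (by omega)

-- ===== VERDICT (by name: the statement is the Claim_ definition above) =====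
theorem solution_spec : Claim_equal_solution := by
  intro food_times k _hDom hPre
  unfold Spec_solution
  rw [solution, solutionLoop_eq_S k _ hPre _ le_rfl, solution_alt,
    bLoop_eq_S k.toNat k _ rfl hPre]
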